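-- pv_equiv track=rewrite | github.com/agnel18/anki-fluent-forever-language-card-generator | streamlit_app/services/sentence_generation/data_transformer.py | map_grammatical_role_to_color_category
-- ===== SOURCE A (Python) =====
-- def map_grammatical_role_to_color_category(role: str) -> str:
--     """Map grammatical role to color category"""
--     role_lower = role.lower()
--
--     if any(kw in role_lower for kw in ['pronoun', 'demonstrative']):
--         return 'pronouns'
--     elif any(kw in role_lower for kw in ['verb', 'linking', 'action']):
--         return 'verbs'
--     elif any(kw in role_lower for kw in ['particle', 'marker']):
--         return 'particles'
--     elif any(kw in role_lower for kw in ['noun', 'object', 'subject']):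
--         return 'nouns'
--     elif any(kw in role_lower for kw in ['adjective', 'description']):
--         return 'adjectives'
--     elif any(kw in role_lower for kw in ['adverb', 'manner']):
--         return 'adverbs'
--     else:
--         return 'other'
-- ===== SOURCE B (Python) =====
-- _KEYWORD_PRIORITY = {
--     'pronoun': 0, 'demonstrative': 0,
--     'verb': 1, 'linking': 1, 'action': 1,
--     'particle': 2, 'marker': 2,
--     'noun': 3, 'object': 3, 'subject': 3,
--     'adjective': 4, 'description': 4,
--     'adverb': 5, 'manner': 5,
-- }
-- _CATEGORIES = ['pronouns', 'verbs', 'particles', 'nouns', 'adjectives', 'adverbs', 'other']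
--
-- def map_grammatical_role_to_color_category(role: str) -> str:
--     """Map grammatical role to color category"""
--     role_lower = role.lower()
--     best = 6
--     for i in range(len(role_lower)):
--         for kw, priority in _KEYWORD_PRIORITY.items():
--             if role_lower.startswith(kw, i):
--                 best = min(best, priority)
--     return _CATEGORIES[best]
-- ===== Notes on version B (the rewrite author's own statement) =====
-- stated objective: alternative
-- what changed: Instead of six ordered any-substring branch tests, B makes one left-to-right scan over the positions of the lowercased role, maintaining the minimum priority of any keyword that starts at a position, and indexes a category table with that minimum; priorities encode the original branch precedence.
import Mathlib
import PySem

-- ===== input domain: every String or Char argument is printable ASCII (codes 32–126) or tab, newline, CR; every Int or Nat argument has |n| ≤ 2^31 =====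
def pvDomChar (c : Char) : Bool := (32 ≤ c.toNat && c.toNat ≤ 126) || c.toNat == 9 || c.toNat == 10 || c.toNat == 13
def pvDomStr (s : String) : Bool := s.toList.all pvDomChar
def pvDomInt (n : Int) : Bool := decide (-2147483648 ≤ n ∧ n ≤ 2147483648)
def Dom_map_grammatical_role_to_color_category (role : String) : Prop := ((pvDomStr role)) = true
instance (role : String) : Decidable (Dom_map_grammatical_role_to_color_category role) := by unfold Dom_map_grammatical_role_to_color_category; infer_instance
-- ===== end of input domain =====

-- B replaces the ordered if/elif substring tests by a single positional scan that keeps the minimum priority of any keyword match and indexes a category table; same value, different traversal (alternative, no speed claim).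


-- ===== PORT A =====
def map_grammatical_role_to_color_category (role : String) : String :=
  let role_lower := PySem.Str.lower role
  if (["pronoun", "demonstrative"].any fun kw => PySem.Str.isIn kw role_lower) then "pronouns"
  else if (["verb", "linking", "action"].any fun kw => PySem.Str.isIn kw role_lower) then "verbs"
  else if (["particle", "marker"].any fun kw => PySem.Str.isIn kw role_lower) then "particles"
  else if (["noun", "object", "subject"].any fun kw => PySem.Str.isIn kw role_lower) then "nouns"
  else if (["adjective", "description"].any fun kw => PySem.Str.isIn kw role_lower) then "adjectives"
  else if (["adverb", "manner"].any fun kw => PySem.Str.isIn kw role_lower) then "adverbs"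
  else "other"

-- ===== PORT B =====
-- the keyword→priority table and category table of Source B
def pvKws : List (String × Nat) :=
  [("pronoun", 0), ("demonstrative", 0),
   ("verb", 1), ("linking", 1), ("action", 1),
   ("particle", 2), ("marker", 2),
   ("noun", 3), ("object", 3), ("subject", 3),
   ("adjective", 4), ("description", 4),
   ("adverb", 5), ("manner", 5)]

def pvCats : List String :=
  ["pronouns", "verbs", "particles", "nouns", "adjectives", "adverbs", "other"]

-- inner loop: for kw, priority in _KEYWORD_PRIORITY.items(): if role_lower.startswith(kw, i): best = min(best, priority)
-- role_lower.startswith(kw, i) with 0 ≤ i ≤ len is exactly a prefix test on the drop-i suffix (exact here since i ranges over 0..len-1)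
def pvInner (rl : List Char) (i : Nat) (b : Nat) : Nat :=
  pvKws.foldl (fun a kp => if PySem.Chars.startswith (rl.drop i) kp.1.toList then min a kp.2 else a) b

-- outer loop: best = 6; for i in range(len(role_lower)): <inner loop>
def pvBest (rl : List Char) : Nat :=
  (List.range rl.length).foldl (fun b i => pvInner rl i b) 6

-- _CATEGORIES[best]; best ≤ 6 always, so the Python indexing never raises and getD is exact
def map_grammatical_role_to_color_category_alt (role : String) : String :=
  pvCats.getD (pvBest (PySem.Str.lower role).toList) "other"

-- ===== PRECONDITION & SPEC =====
def Spec_map_grammatical_role_to_color_category (role : String) (out : String) : Prop := out = map_grammatical_role_to_color_category_alt role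
instance (role : String) (out : String) : Decidable (Spec_map_grammatical_role_to_color_category role out) := by unfold Spec_map_grammatical_role_to_color_category; infer_instance

-- ===== CLAIM (what is proved, stated in full; the proofs are below) =====
def Claim_equal_map_grammatical_role_to_color_category : Prop := ∀ (role : String), Dom_map_grammatical_role_to_color_category role → Spec_map_grammatical_role_to_color_category role (map_grammatical_role_to_color_category role)

-- ===== LEMMAS AND PROOFS =====

-- generic facts about the min-fold performed by the inner loop
lemma pvMinFold_le (L : List (String × Nat)) (c : String → Bool) (b : Nat) :
    L.foldl (fun a kp => if c kp.1 then min a kp.2 else a) b ≤ b := by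
  induction L generalizing b with
  | nil => simp
  | cons x xs ih =>
      simp only [List.foldl_cons]
      split
      · exact le_trans (ih _) (min_le_left _ _)
      · exact ih b

lemma pvMinFold_le_of_mem (L : List (String × Nat)) (c : String → Bool) (b : Nat)
    (kp : String × Nat) (hm : kp ∈ L) (hc : c kp.1 = true) :
    L.foldl (fun a kp => if c kp.1 then min a kp.2 else a) b ≤ kp.2 := by
  induction L generalizing b with
  | nil => cases hm
  | cons x xs ih =>
      simp only [List.foldl_cons]
      rcases List.mem_cons.mp hm with h | h
      · subst h
        rw [if_pos hc]
        exact le_trans (pvMinFold_le xs c _) (min_le_right _ _)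
      · split
        · exact ih _ h
        · exact ih b h

lemma pvMinFold_attain (L : List (String × Nat)) (c : String → Bool) (b : Nat) :
    L.foldl (fun a kp => if c kp.1 then min a kp.2 else a) b = b ∨
    ∃ kp ∈ L, c kp.1 = true ∧ L.foldl (fun a kp => if c kp.1 then min a kp.2 else a) b = kp.2 := by
  induction L generalizing b with
  | nil => exact Or.inl rfl
  | cons x xs ih =>
      simp only [List.foldl_cons]
      by_cases hc : c x.1 = true
      · rw [if_pos hc]
        rcases ih (min b x.2) with h | ⟨kp, hm, hck, he⟩
        · rcases Nat.le_total b x.2 with hb | hb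
          · left; rw [h]; omega
          · right; exact ⟨x, List.mem_cons_self, hc, by rw [h]; omega⟩
        · right; exact ⟨kp, List.mem_cons_of_mem _ hm, hck, he⟩
      · rw [if_neg hc]
        rcases ih b with h | ⟨kp, hm, hck, he⟩
        · exact Or.inl h
        · exact Or.inr ⟨kp, List.mem_cons_of_mem _ hm, hck, he⟩

-- facts about the outer loop
lemma pvInner_le (rl : List Char) (i : Nat) (b : Nat) : pvInner rl i b ≤ b := by
  unfold pvInner
  exact pvMinFold_le pvKws (fun s => PySem.Chars.startswith (rl.drop i) s.toList) b

lemma pvInner_le_of_mem (rl : List Char) (i : Nat) (b : Nat) (kp : String × Nat)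
    (hm : kp ∈ pvKws) (hc : PySem.Chars.startswith (rl.drop i) kp.1.toList = true) :
    pvInner rl i b ≤ kp.2 := by
  unfold pvInner
  exact pvMinFold_le_of_mem pvKws (fun s => PySem.Chars.startswith (rl.drop i) s.toList) b kp hm hc

lemma pvInner_attain (rl : List Char) (i : Nat) (b : Nat) :
    pvInner rl i b = b ∨ ∃ kp ∈ pvKws, PySem.Chars.startswith (rl.drop i) kp.1.toList = true ∧
      pvInner rl i b = kp.2 := by
  unfold pvInner
  exact pvMinFold_attain pvKws (fun s => PySem.Chars.startswith (rl.drop i) s.toList) b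

lemma pvOuter_le (rl : List Char) (L : List Nat) (b : Nat) :
    L.foldl (fun b i => pvInner rl i b) b ≤ b := by
  induction L generalizing b with
  | nil => simp
  | cons x xs ih => exact le_trans (ih _) (pvInner_le _ _ _)

lemma pvOuter_le_of_mem (rl : List Char) (L : List Nat) (b : Nat) (i : Nat) (hi : i ∈ L)
    (kp : String × Nat) (hm : kp ∈ pvKws)
    (hc : PySem.Chars.startswith (rl.drop i) kp.1.toList = true) :
    L.foldl (fun b i => pvInner rl i b) b ≤ kp.2 := by
  induction L generalizing b with
  | nil => cases hi
  | cons x xs ih =>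
      simp only [List.foldl_cons]
      rcases List.mem_cons.mp hi with h | h
      · subst h
        exact le_trans (pvOuter_le rl xs _) (pvInner_le_of_mem _ _ _ kp hm hc)
      · exact ih _ h

lemma pvOuter_attain (rl : List Char) (L : List Nat) (b : Nat) :
    L.foldl (fun b i => pvInner rl i b) b = b ∨
    ∃ kp ∈ pvKws, PySem.Chars.isIn kp.1.toList rl = true ∧
      L.foldl (fun b i => pvInner rl i b) b = kp.2 := by
  induction L generalizing b with
  | nil => exact Or.inl rfl
  | cons x xs ih =>
      simp only [List.foldl_cons]
      rcases ih (pvInner rl x b) with h | ⟨kp, hm, hck, he⟩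
      · rw [h]
        rcases pvInner_attain rl x b with h2 | ⟨kp, hm, hck, he⟩
        · exact Or.inl h2
        · refine Or.inr ⟨kp, hm, ?_, he⟩
          exact (PySem.Chars.exists_prefix_drop_iff_isIn _ _).mp
            ⟨x, (PySem.Chars.startswith_iff _ _).mp hck⟩
      · exact Or.inr ⟨kp, hm, hck, he⟩

lemma pvKws_nonempty_keys : ∀ kp ∈ pvKws, kp.1.toList ≠ [] := by decide

lemma pvBest_le (rl : List Char) (kp : String × Nat) (hm : kp ∈ pvKws)
    (h : PySem.Chars.isIn kp.1.toList rl = true) : pvBest rl ≤ kp.2 := by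
  obtain ⟨j, hj⟩ := (PySem.Chars.exists_prefix_drop_iff_isIn _ _).mpr h
  have hjlt : j < rl.length := by
    by_contra hge
    rw [List.drop_eq_nil_of_le (by omega)] at hj
    exact pvKws_nonempty_keys kp hm (List.prefix_nil.mp hj)
  exact pvOuter_le_of_mem rl _ 6 j (List.mem_range.mpr hjlt) kp hm
    ((PySem.Chars.startswith_iff _ _).mpr hj)

lemma pvBest_attain (rl : List Char) :
    pvBest rl = 6 ∨ ∃ kp ∈ pvKws, PySem.Chars.isIn kp.1.toList rl = true ∧ pvBest rl = kp.2 :=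
  pvOuter_attain rl _ 6

-- if every keyword of priority < p fails to occur, the minimum is at least p
lemma pvBest_ge (rl : List Char) (p : Nat) (hp : p ≤ 6)
    (h : ∀ kp ∈ pvKws, kp.2 < p → PySem.Chars.isIn kp.1.toList rl = false) :
    p ≤ pvBest rl := by
  rcases pvBest_attain rl with he | ⟨kp, hm, hck, he⟩
  · omega
  · rw [he]
    by_contra hlt
    rw [h kp hm (by omega)] at hck
    cases hck

-- ===== VERDICT (by name: the statement is the Claim_ definition above) =====
lemma pvBest_le6 (rl : List Char) : pvBest rl ≤ 6 := by
  unfold pvBest; exact pvOuter_le _ _ _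

theorem map_grammatical_role_to_color_category_spec : Claim_equal_map_grammatical_role_to_color_category := by
  intro role _
  unfold Spec_map_grammatical_role_to_color_category
    map_grammatical_role_to_color_category map_grammatical_role_to_color_category_alt
  simp only [List.any_cons, List.any_nil, Bool.or_false, PySem.Str.isIn_eq]
  set rl := (PySem.Str.lower role).toList with hrl
  split_ifs with g0 g1 g2 g3 g4 g5
  · simp only [Bool.or_eq_true] at g0
    have hb : pvBest rl = 0 := Nat.le_zero.mp (by
      rcases g0 with h | h
      · exact pvBest_le rl ("pronoun", 0) (by decide) h
      · exact pvBest_le rl ("demonstrative", 0) (by decide) h)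
    rw [hb]; rfl
  · simp only [Bool.or_eq_true, not_or, Bool.not_eq_true] at g0
    simp only [Bool.or_eq_true] at g1
    have hle : pvBest rl ≤ 1 := by
      rcases g1 with h | h | h
      · exact pvBest_le rl ("verb", 1) (by decide) h
      · exact pvBest_le rl ("linking", 1) (by decide) h
      · exact pvBest_le rl ("action", 1) (by decide) h
    have hge : 1 ≤ pvBest rl := pvBest_ge rl 1 (by omega)
      (by intro kp hm hlt; fin_cases hm <;> simp_all)
    have hb : pvBest rl = 1 := le_antisymm hle hge
    rw [hb]; rfl
  · simp only [Bool.or_eq_true, not_or, Bool.not_eq_true] at g0 g1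
    simp only [Bool.or_eq_true] at g2
    have hle : pvBest rl ≤ 2 := by
      rcases g2 with h | h
      · exact pvBest_le rl ("particle", 2) (by decide) h
      · exact pvBest_le rl ("marker", 2) (by decide) h
    have hge : 2 ≤ pvBest rl := pvBest_ge rl 2 (by omega)
      (by intro kp hm hlt; fin_cases hm <;> simp_all)
    have hb : pvBest rl = 2 := le_antisymm hle hge
    rw [hb]; rfl
  · simp only [Bool.or_eq_true, not_or, Bool.not_eq_true] at g0 g1 g2
    simp only [Bool.or_eq_true] at g3
    have hle : pvBest rl ≤ 3 := by
      rcases g3 with h | h | h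
      · exact pvBest_le rl ("noun", 3) (by decide) h
      · exact pvBest_le rl ("object", 3) (by decide) h
      · exact pvBest_le rl ("subject", 3) (by decide) h
    have hge : 3 ≤ pvBest rl := pvBest_ge rl 3 (by omega)
      (by intro kp hm hlt; fin_cases hm <;> simp_all)
    have hb : pvBest rl = 3 := le_antisymm hle hge
    rw [hb]; rfl
  · simp only [Bool.or_eq_true, not_or, Bool.not_eq_true] at g0 g1 g2 g3
    simp only [Bool.or_eq_true] at g4
    have hle : pvBest rl ≤ 4 := by
      rcases g4 with h | h
      · exact pvBest_le rl ("adjective", 4) (by decide) h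
      · exact pvBest_le rl ("description", 4) (by decide) h
    have hge : 4 ≤ pvBest rl := pvBest_ge rl 4 (by omega)
      (by intro kp hm hlt; fin_cases hm <;> simp_all)
    have hb : pvBest rl = 4 := le_antisymm hle hge
    rw [hb]; rfl
  · simp only [Bool.or_eq_true, not_or, Bool.not_eq_true] at g0 g1 g2 g3 g4
    simp only [Bool.or_eq_true] at g5
    have hle : pvBest rl ≤ 5 := by
      rcases g5 with h | h
      · exact pvBest_le rl ("adverb", 5) (by decide) h
      · exact pvBest_le rl ("manner", 5) (by decide) h
    have hge : 5 ≤ pvBest rl := pvBest_ge rl 5 (by omega)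
      (by intro kp hm hlt; fin_cases hm <;> simp_all)
    have hb : pvBest rl = 5 := le_antisymm hle hge
    rw [hb]; rfl
  · simp only [Bool.or_eq_true, not_or, Bool.not_eq_true] at g0 g1 g2 g3 g4 g5
    have hb : pvBest rl = 6 := le_antisymm (pvBest_le6 rl) (pvBest_ge rl 6 le_rfl
      (by intro kp hm hlt; fin_cases hm <;> simp_all))
    rw [hb]; rfl
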